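-- pv_equiv track=rewrite | github.com/Samaa-Hazem2001/RSA_Cryptography_Cryptanalysis | crypto/Ass1_Functions.py | CharGrouping
-- ===== SOURCE A (Python) =====
-- def CharGrouping(cNumValue_list):
--     spaces = [36]
--     numCharPerGroup = 5
--     mod_result = len(cNumValue_list)%numCharPerGroup
--     increased_spaces =[]
--     if(mod_result !=0):
--         increased_spaces = (numCharPerGroup-(mod_result))*spaces
--     cNumValue_list = cNumValue_list+increased_spaces
--     #NOTE: integer division in python is done by // not /
--     numGroups = len(cNumValue_list)//numCharPerGroup
--     groupValues = []
--     for i in range(numGroups):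
--         groupValue = 0
--         for j in range(numCharPerGroup):
--             groupValue += cNumValue_list[5*i+j]* ((37)**(4-j))
--         groupValues.append(groupValue)
--     return groupValues
-- ===== SOURCE B (Python) =====
-- def CharGrouping(cNumValue_list):
--     padded = cNumValue_list + [36] * ((5 - len(cNumValue_list) % 5) % 5)
--     groupValues = []
--     acc = 0
--     for idx, x in enumerate(padded, 1):
--         acc = acc * 37 + x
--         if idx % 5 == 0:
--             groupValues.append(acc)
--             acc = 0
--     return groupValues
-- ===== Notes on version B (the rewrite author's own statement) =====
-- stated objective: idiomatic
-- what changed: A's indexed double loop with 37**(4-j) powers is replaced by a single enumerate pass that maintains a Horner accumulator (acc = acc*37 + x) and flushes it at every 5th element, removing index arithmetic and exponentiation.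
import Mathlib
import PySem

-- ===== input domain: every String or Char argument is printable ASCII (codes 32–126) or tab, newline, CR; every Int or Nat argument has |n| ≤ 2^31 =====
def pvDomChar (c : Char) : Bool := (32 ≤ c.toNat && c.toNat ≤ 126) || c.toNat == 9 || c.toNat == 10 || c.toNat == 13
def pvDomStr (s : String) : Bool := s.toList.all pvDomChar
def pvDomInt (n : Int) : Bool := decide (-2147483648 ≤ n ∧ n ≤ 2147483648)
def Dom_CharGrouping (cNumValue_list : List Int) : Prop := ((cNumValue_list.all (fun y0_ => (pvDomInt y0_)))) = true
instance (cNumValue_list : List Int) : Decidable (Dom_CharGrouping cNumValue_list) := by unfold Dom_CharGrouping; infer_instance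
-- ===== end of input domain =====

-- B replaces A's indexed double loop with one enumerate pass keeping a Horner accumulator
-- (acc = acc*37 + x, flushed every 5th element), removing index arithmetic and exponentiation; objective: idiomatic.

-- ===== PORT A =====
-- literal transliteration of A: pad with 36s when len % 5 ≠ 0, then for each group i
-- sum cNumValue_list[5*i+j] * 37^(4-j).  Python list repetition n*[36] is List.replicate;
-- pyGetD 0 is exact here since every index 5*i+j is in range for i < numGroups;
-- the exponent 4-j is nonnegative for j in range(5), so ^(4-j).toNat is exact.
def CharGrouping (cNumValue_list : List Int) : List Int :=
  let numCharPerGroup : Int := 5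
  let mod_result : Int := PySem.Int.mod (cNumValue_list.length : Int) numCharPerGroup
  let increased_spaces : List Int :=
    if mod_result ≠ 0 then List.replicate (numCharPerGroup - mod_result).toNat 36 else []
  let ys := cNumValue_list ++ increased_spaces
  let numGroups : Int := PySem.Int.floordiv (ys.length : Int) numCharPerGroup
  (PySem.List.pyRange 0 numGroups 1).foldl
    (fun groupValues i =>
      groupValues ++
        [(PySem.List.pyRange 0 numCharPerGroup 1).foldl
          (fun gv j => gv + PySem.List.pyGetD ys (5 * i + j) 0 * 37 ^ (4 - j).toNat) 0])
    []

-- ===== PORT B =====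
-- Source B's loop body: Horner-update the accumulator, flush it when the 1-based index hits a multiple of 5
def pvStep (st : List Int × Int) (p : Int × Int) : List Int × Int :=
  let acc := st.2 * 37 + p.2
  if PySem.Int.mod p.1 5 = 0 then (st.1 ++ [acc], 0) else (st.1, acc)

def CharGrouping_alt (cNumValue_list : List Int) : List Int :=
  let padded := cNumValue_list ++ List.replicate ((5 - cNumValue_list.length % 5) % 5) 36
  ((PySem.List.enumerate padded 1).foldl pvStep ([], 0)).1

-- ===== PRECONDITION & SPEC =====
def Spec_CharGrouping (cNumValue_list : List Int) (out : List Int) : Prop := out = CharGrouping_alt cNumValue_list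
instance (cNumValue_list : List Int) (out : List Int) : Decidable (Spec_CharGrouping cNumValue_list out) := by unfold Spec_CharGrouping; infer_instance

-- ===== CLAIM (what is proved, stated in full; the proofs are below) =====
def Claim_equal_CharGrouping : Prop := ∀ (cNumValue_list : List Int), Dom_CharGrouping cNumValue_list → Spec_CharGrouping cNumValue_list (CharGrouping cNumValue_list)

-- ===== LEMMAS AND PROOFS =====

-- the value A's inner loop computes for group i
def pvInner (ys : List Int) (i : Int) : Int :=
  (PySem.List.pyRange 0 5 1).foldl
    (fun gv j => gv + PySem.List.pyGetD ys (5 * i + j) 0 * 37 ^ (4 - j).toNat) 0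

lemma getD5 (a b c d e x : Int) (rest : List Int) (m : Nat) :
    List.getD (a::b::c::d::e::rest) (m+5) x = List.getD rest m x := by
  simp

lemma pvInner_succ (a b c d e : Int) (rest : List Int) (k : Nat) :
    pvInner (a::b::c::d::e::rest) ((k:Int)+1) = pvInner rest (k:Int) := by
  have hr : PySem.List.pyRange 0 5 1 = [0,1,2,3,4] := by decide
  simp only [pvInner, hr, List.foldl]
  have h : ∀ j : Nat, 5 * ((k:Int)+1) + (j:Int) = ((5*k+j+5 : Nat):Int) := by
    intro j; push_cast; ring
  have h' : ∀ j : Nat, 5 * (k:Int) + (j:Int) = ((5*k+j : Nat):Int) := by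
    intro j; push_cast; ring
  rw [show (5 * ((k:Int)+1) + 0) = ((5*k+0+5:Nat):Int) by exact_mod_cast h 0,
      show (5 * ((k:Int)+1) + 1) = ((5*k+1+5:Nat):Int) by exact_mod_cast h 1,
      show (5 * ((k:Int)+1) + 2) = ((5*k+2+5:Nat):Int) by exact_mod_cast h 2,
      show (5 * ((k:Int)+1) + 3) = ((5*k+3+5:Nat):Int) by exact_mod_cast h 3,
      show (5 * ((k:Int)+1) + 4) = ((5*k+4+5:Nat):Int) by exact_mod_cast h 4,
      show (5 * (k:Int) + 0) = ((5*k+0:Nat):Int) by exact_mod_cast h' 0,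
      show (5 * (k:Int) + 1) = ((5*k+1:Nat):Int) by exact_mod_cast h' 1,
      show (5 * (k:Int) + 2) = ((5*k+2:Nat):Int) by exact_mod_cast h' 2,
      show (5 * (k:Int) + 3) = ((5*k+3:Nat):Int) by exact_mod_cast h' 3,
      show (5 * (k:Int) + 4) = ((5*k+4:Nat):Int) by exact_mod_cast h' 4]
  simp only [PySem.List.pyGetD_natCast, getD5, Nat.add_zero]

lemma pvInner_zero (a b c d e : Int) (rest : List Int) :
    pvInner (a::b::c::d::e::rest) 0 =
      ((((0 * 37 + a) * 37 + b) * 37 + c) * 37 + d) * 37 + e := by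
  have hr : PySem.List.pyRange 0 5 1 = [0,1,2,3,4] := by decide
  simp only [pvInner, hr, List.foldl]
  simp [pysem]
  ring

-- the 1-based counter is not a multiple of 5 inside a group …
lemma pvModFact (m j : Nat) (hj : j < 5) (hj0 : j ≠ 0) :
    PySem.Int.mod ((5*m+j : Nat) : Int) 5 ≠ 0 := by
  have := PySem.Int.mod_natCast (5*m+j) 5
  have h2 : ((5:Nat):Int) = (5:Int) := by norm_num
  rw [h2] at this
  rw [this]
  have : (5*m+j) % 5 = j := by omega
  rw [this]
  exact_mod_cast hj0

-- … and is one exactly at its end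
lemma pvModFact0 (m : Nat) : PySem.Int.mod ((5*m+5 : Nat) : Int) 5 = 0 := by
  have := PySem.Int.mod_natCast (5*m+5) 5
  have h2 : ((5:Nat):Int) = (5:Int) := by norm_num
  rw [h2] at this
  rw [this]
  have : (5*m+5) % 5 = 0 := by omega
  rw [this]
  rfl

-- on a list whose length is a multiple of 5, B's enumerate pass (entered at counter 5m+1
-- with a flushed accumulator) emits exactly A's per-group values
lemma pvB (g : Nat) : ∀ ys : List Int, ys.length = 5 * g → ∀ (m : Nat) (out : List Int),
    ((PySem.List.enumerate ys ((5*m+1 : Nat) : Int)).foldl pvStep (out, 0)).1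
      = out ++ (List.range g).map (fun (k : Nat) => pvInner ys (k:Int)) := by
  induction g with
  | zero =>
      intro ys h m out
      have : ys = [] := List.length_eq_zero_iff.mp (by omega)
      subst this; simp [PySem.List.enumerate_nil]
  | succ g ih =>
      intro ys h m out
      match ys, h with
      | a::b::c::d::e::rest, h =>
        have hrest : rest.length = 5 * g := by simp at h; omega
        simp only [PySem.List.enumerate_cons, List.foldl_cons]
        have c1 : ((5*m+1 : Nat) : Int) + 1 = ((5*m+2 : Nat) : Int) := by push_cast; ring
        have c2 : ((5*m+2 : Nat) : Int) + 1 = ((5*m+3 : Nat) : Int) := by push_cast; ring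
        have c3 : ((5*m+3 : Nat) : Int) + 1 = ((5*m+4 : Nat) : Int) := by push_cast; ring
        have c4 : ((5*m+4 : Nat) : Int) + 1 = ((5*m+5 : Nat) : Int) := by push_cast; ring
        have c5 : ((5*m+5 : Nat) : Int) + 1 = ((5*(m+1)+1 : Nat) : Int) := by push_cast; ring
        rw [c1, c2, c3, c4, c5]
        simp only [pvStep, if_neg (pvModFact m 1 (by omega) (by omega)),
          if_neg (pvModFact m 2 (by omega) (by omega)),
          if_neg (pvModFact m 3 (by omega) (by omega)),
          if_neg (pvModFact m 4 (by omega) (by omega)),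
          if_pos (pvModFact0 m)]
        rw [ih rest hrest (m+1)]
        rw [List.range_succ_eq_map, List.map_cons, List.map_map]
        have hcast : ((fun k : Nat => pvInner (a::b::c::d::e::rest) (k:Int)) ∘ Nat.succ)
            = fun k : Nat => pvInner rest (k:Int) := by
          funext k
          simp only [Function.comp]
          rw [show ((Nat.succ k : Nat) : Int) = (k:Int) + 1 by push_cast; ring]
          exact pvInner_succ a b c d e rest k
        rw [hcast, show ((0:Nat):Int) = 0 from rfl, pvInner_zero]
        simp

lemma main_eq (l : List Int) : CharGrouping l = CharGrouping_alt l := by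
  have hm : PySem.Int.mod (l.length : Int) 5 = ((l.length % 5 : Nat) : Int) := by
    exact_mod_cast PySem.Int.mod_natCast l.length 5
  have hpad : (if PySem.Int.mod (l.length : Int) 5 ≠ 0 then
        List.replicate ((5 : Int) - PySem.Int.mod (l.length : Int) 5).toNat (36:Int) else []) =
      List.replicate ((5 - l.length % 5) % 5) (36:Int) := by
    rw [hm]
    by_cases hr : l.length % 5 = 0
    · simp [hr]
    · have h5 : l.length % 5 < 5 := Nat.mod_lt _ (by omega)
      rw [if_pos (by exact_mod_cast hr)]
      congr 1
      omega
  set ys := l ++ List.replicate ((5 - l.length % 5) % 5) (36:Int) with hys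
  have hlen : ys.length = 5 * (ys.length / 5) := by
    have : ys.length % 5 = 0 := by
      simp only [hys, List.length_append, List.length_replicate]
      omega
    omega
  have hfd : PySem.Int.floordiv (ys.length : Int) 5 = ((ys.length / 5 : Nat) : Int) := by
    exact_mod_cast PySem.Int.floordiv_natCast ys.length 5
  show (PySem.List.pyRange 0 (PySem.Int.floordiv
      ((l ++ if PySem.Int.mod (l.length : Int) 5 ≠ 0 then
        List.replicate ((5 : Int) - PySem.Int.mod (l.length : Int) 5).toNat (36:Int) else []).length : Int) 5) 1).foldl _ [] = _
  rw [hpad, ← hys, hfd, PySem.List.pyRange_zero_natCast,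
      PySem.List.foldl_append_singleton_eq_map, List.map_map, List.nil_append]
  show (List.range (ys.length / 5)).map (fun (k : Nat) => pvInner ys (k:Int))
      = ((PySem.List.enumerate ys 1).foldl pvStep ([], 0)).1
  rw [show (1:Int) = ((5*0+1 : Nat) : Int) by norm_num,
      pvB (ys.length / 5) ys hlen 0 []]
  simp

-- ===== VERDICT (by name: the statement is the Claim_ definition above) =====
theorem CharGrouping_spec : Claim_equal_CharGrouping := by
  intro l _
  unfold Spec_CharGrouping
  exact main_eq l
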